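-- pv_equiv track=rewrite | github.com/blackJJW/coding_test | 백준/Silver/4673. 셀프 넘버/셀프 넘버.py | check_self_number
-- ===== SOURCE A (Python) =====
-- def check_self_number(a):
--     input_num = a
--     tmp = 0
--     result = 0
--     input_num_list = [int(a) for a in str(input_num)]
--     for i in input_num_list:
--         tmp += i
--     result = input_num + tmp
--
--     return result
-- ===== SOURCE B (Python) =====
-- def check_self_number(a):
--     total = 0
--     m = a
--     while m > 0:
--         total += m % 10
--         m //= 10
--     return a + total
-- ===== Notes on version B (the rewrite author's own statement) =====
-- stated objective: simpler
-- what changed: Digit sum computed arithmetically with a %10 / //10 loop instead of converting the number to a string and mapping int() over its characters.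
import Mathlib
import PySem

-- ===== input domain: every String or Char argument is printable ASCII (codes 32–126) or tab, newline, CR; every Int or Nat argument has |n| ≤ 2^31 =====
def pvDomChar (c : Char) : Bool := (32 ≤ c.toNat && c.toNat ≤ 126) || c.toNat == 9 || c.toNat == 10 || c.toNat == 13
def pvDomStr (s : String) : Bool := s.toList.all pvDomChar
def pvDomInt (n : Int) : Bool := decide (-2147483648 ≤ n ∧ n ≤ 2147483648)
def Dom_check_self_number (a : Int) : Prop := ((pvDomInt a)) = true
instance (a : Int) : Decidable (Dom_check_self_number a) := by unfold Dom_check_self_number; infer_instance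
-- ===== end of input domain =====

-- B computes the digit sum arithmetically (m % 10, m //= 10) instead of A's
-- string conversion with per-character int(); objective: simpler.


-- ===== PORT A =====
-- int(c) for a single character c; the .getD 0 default is unreachable under
-- Pre_ (for a ≥ 0 every character of str(a) is a decimal digit).
def pvCharVal (c : Char) : Int := (PySem.Int.ofChars? [c]).getD 0

def check_self_number (a : Int) : Int :=
  let input_num := a
  let input_num_list := (PySem.Int.toStr input_num).toList.map pvCharVal
  let tmp := input_num_list.foldl (fun t i => t + i) 0
  input_num + tmp

-- ===== PORT B =====
-- the while-loop of Source B: while m > 0: total += m % 10; m //= 10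
def pvDigitLoop (m total : Int) : Int :=
  if 0 < m then pvDigitLoop (PySem.Int.floordiv m 10) (total + PySem.Int.mod m 10) else total
termination_by m.toNat
decreasing_by
  rw [PySem.Int.floordiv_eq_ediv_of_pos (by omega)]
  omega

def check_self_number_alt (a : Int) : Int :=
  a + pvDigitLoop a 0

-- ===== PRECONDITION & SPEC =====
-- For a < 0, A calls int('-') on the sign character of str(a) and raises ValueError.
def Pre_check_self_number (a : Int) : Prop := 0 ≤ a
instance (a : Int) : Decidable (Pre_check_self_number a) := by unfold Pre_check_self_number; infer_instance
def pvWitness_check_self_number : Int := 12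

def Spec_check_self_number (a : Int) (out : Int) : Prop := out = check_self_number_alt a
instance (a : Int) (out : Int) : Decidable (Spec_check_self_number a out) := by unfold Spec_check_self_number; infer_instance

-- ===== CLAIM (what is proved, stated in full; the proofs are below) =====
def Claim_equal_check_self_number : Prop := ∀ (a : Int), Dom_check_self_number a → Pre_check_self_number a → Spec_check_self_number a (check_self_number a)

-- ===== LEMMAS AND PROOFS =====

-- arithmetic digit sum of a natural number, the common value of both ports
def pvS (n : Nat) : Int :=
  if n = 0 then 0 else (n % 10 : Nat) + pvS (n / 10)
decreasing_by omega

theorem pvCharVal_digitChar (d : Nat) (hd : d < 10) :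
    pvCharVal (Nat.digitChar d) = (d : Int) := by
  interval_cases d <;> decide

theorem sum_toDigitsCore (fuel : Nat) :
    ∀ (n : Nat) (acc : List Char), n < fuel →
      ((Nat.toDigitsCore 10 fuel n acc).map pvCharVal).sum
        = pvS n + (acc.map pvCharVal).sum := by
  induction fuel with
  | zero => intro n acc h; omega
  | succ f ih =>
    intro n acc h
    rw [Nat.toDigitsCore]
    have hlt : n % 10 < 10 := Nat.mod_lt _ (by omega)
    by_cases h10 : n / 10 = 0
    · simp only [h10, if_true, List.map_cons, List.sum_cons, pvCharVal_digitChar _ hlt]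
      have hsum : pvS n = ((n % 10 : Nat) : Int) := by
        by_cases hn : n = 0
        · subst hn; simp [pvS]
        · conv_lhs => rw [pvS]
          simp [hn, h10, pvS]
      rw [hsum]
    · simp only [h10, if_false]
      rw [ih (n / 10) _ (by omega), List.map_cons, List.sum_cons,
        pvCharVal_digitChar _ hlt]
      have hn : n ≠ 0 := by omega
      conv_rhs => rw [pvS]
      simp [hn]
      ring

theorem pvDigitLoop_eq (k : Nat) : ∀ (total : Int), pvDigitLoop (k : Int) total = total + pvS k := by
  induction k using Nat.strong_induction_on with
  | _ k ih =>
    intro total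
    rw [pvDigitLoop]
    by_cases hk : k = 0
    · subst hk; simp [pvS]
    · have hpos : (0 : Int) < (k : Int) := by exact_mod_cast Nat.pos_of_ne_zero hk
      rw [if_pos hpos, PySem.Int.floordiv_eq_ediv_of_pos (by norm_num),
        PySem.Int.mod_eq_emod_of_pos (by norm_num)]
      have h1 : (k : Int) / 10 = ((k / 10 : Nat) : Int) := by omega
      have h2 : (k : Int) % 10 = ((k % 10 : Nat) : Int) := by omega
      rw [h1, h2, ih (k / 10) (by omega)]
      conv_rhs => rw [pvS]
      simp [hk]
      ring

-- ===== VERDICT (by name: the statement is the Claim_ definition above) =====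
theorem check_self_number_spec : Claim_equal_check_self_number := by
  intro a _ hpre
  unfold Pre_check_self_number at hpre
  unfold Spec_check_self_number
  simp only [check_self_number, check_self_number_alt]
  rw [PySem.List.foldl_add (g := fun (i : Int) => i)]
  rw [PySem.Int.toList_toStr]
  unfold PySem.Int.toChars
  rw [if_neg (by omega), Nat.toDigits, List.map_id']
  rw [sum_toDigitsCore _ _ [] (by omega)]
  have ha : a = ((a.toNat : Nat) : Int) := by omega
  conv_rhs => rw [ha]
  rw [pvDigitLoop_eq, ← ha]
  simp
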